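-- pv_equiv track=rewrite | github.com/yiming0325/The-bottom-up-deterministic-finite-tree-automata | print_tree.py | simple_form
-- ===== SOURCE A (Python) =====
-- def simple_form(s):
--     s_pattern = {}
--     key = 0
--     tmp_string = ""
--     simple_string = ""
--     for char in s:
--         if char in [',','(',')']:
--             if not tmp_string=="":
--                 s_pattern[key] = tmp_string
--                 simple_string = simple_string + str(key) + char
--                 key += 1
--             else:
--                 simple_string = simple_string + char
--             tmp_string = ""
--         else:
--             tmp_string = tmp_string + char
--     return  simple_string,s_pattern
-- ===== SOURCE B (Python) =====
-- def simple_form(s):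
--     # Token-level rewrite: repeatedly locate the next delimiter, slice off the
--     # run before it, and emit pieces joined at the end (trailing run with no
--     # delimiter after it is dropped, as in the original).
--     pattern = {}
--     pieces = []
--     key = 0
--     rest = s
--     while True:
--         i = next((j for j, c in enumerate(rest) if c in ',()'), -1)
--         if i < 0:
--             break
--         run, delim, rest = rest[:i], rest[i], rest[i + 1:]
--         if run:
--             pattern[key] = run
--             pieces.append(str(key) + delim)
--             key += 1
--         else:
--             pieces.append(delim)
--     return "".join(pieces), pattern
-- ===== Notes on version B (the rewrite author's own statement) =====
-- stated objective: alternative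
-- what changed: Replaces A's character-by-character accumulator state machine with a token-level scan that repeatedly finds the next delimiter, slices off the run before it, and joins the collected pieces at the end.
import Mathlib
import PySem

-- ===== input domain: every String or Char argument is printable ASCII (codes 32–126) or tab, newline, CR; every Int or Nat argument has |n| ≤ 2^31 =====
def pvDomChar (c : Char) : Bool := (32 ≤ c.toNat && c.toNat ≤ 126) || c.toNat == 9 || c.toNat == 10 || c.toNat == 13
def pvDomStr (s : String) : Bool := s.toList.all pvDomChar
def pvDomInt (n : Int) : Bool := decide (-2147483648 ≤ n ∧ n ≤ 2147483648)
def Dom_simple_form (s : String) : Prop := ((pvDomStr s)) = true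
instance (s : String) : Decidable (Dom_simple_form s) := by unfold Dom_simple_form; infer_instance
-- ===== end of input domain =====

-- B replaces A's character-by-character accumulator state machine by a token-level scan that
-- repeatedly slices off the run before the next delimiter and joins the pieces at the end
-- (objective: alternative decomposition, same cost).

-- ===== PORT A =====
-- the list [',','(',')'] of A's membership test
def pvDelims : List Char := [',', '(', ')']

-- one iteration of A's for-loop; state = (s_pattern, key, tmp_string, simple_string), strings as char lists
def pvStepA (st : PySem.Dict Int String × Int × List Char × List Char) (c : Char) :
    PySem.Dict Int String × Int × List Char × List Char :=
  match st with
  | (pat, key, tmp, simple) =>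
    if c ∈ pvDelims then
      if tmp ≠ [] then
        (pat.insert key (String.ofList tmp), key + 1, [], simple ++ PySem.Int.toChars key ++ [c])
      else
        (pat, key, [], simple ++ [c])
    else
      (pat, key, tmp ++ [c], simple)

def simple_form (s : String) : String × (List (Int × String)) :=
  let st := s.toList.foldl pvStepA ((PySem.Dict.empty : PySem.Dict Int String), 0, [], [])
  (String.ofList st.2.2.2, st.1.items)

-- ===== PORT B =====
-- B's membership test `c in ',()'`
def pvIsDelim (c : Char) : Bool := c == ',' || c == '(' || c == ')'

-- B's while-loop: find the next delimiter (dropWhile), slice off the run before it (takeWhile),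
-- emit a piece, continue on the remainder; returns (pieces, pattern)
def pvLoopB (cs : List Char) (key : Int) (pieces : List (List Char))
    (pat : PySem.Dict Int String) : List (List Char) × PySem.Dict Int String :=
  match h : cs.dropWhile (fun c => !pvIsDelim c) with
  | [] => (pieces, pat)
  | d :: rest =>
    let run := cs.takeWhile (fun c => !pvIsDelim c)
    if run ≠ [] then
      pvLoopB rest (key + 1) (pieces ++ [PySem.Int.toChars key ++ [d]])
        (pat.insert key (String.ofList run))
    else
      pvLoopB rest key (pieces ++ [[d]]) pat
  termination_by cs.length
  decreasing_by
    all_goals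
      have hle : (cs.dropWhile (fun c => !pvIsDelim c)).length ≤ cs.length :=
        List.length_dropWhile_le _ _
      rw [h] at hle
      simp at hle; omega

def simple_form_alt (s : String) : String × (List (Int × String)) :=
  let r := pvLoopB s.toList 0 [] PySem.Dict.empty
  (String.ofList (PySem.Chars.join [] r.1), r.2.items)

-- ===== PRECONDITION & SPEC =====
def Spec_simple_form (s : String) (out : String × (List (Int × String))) : Prop := out = simple_form_alt s
instance (s : String) (out : String × (List (Int × String))) : Decidable (Spec_simple_form s out) := by unfold Spec_simple_form; infer_instance

-- ===== CLAIM (what is proved, stated in full; the proofs are below) =====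
def Claim_equal_simple_form : Prop := ∀ (s : String), Dom_simple_form s → Spec_simple_form s (simple_form s)

-- ===== LEMMAS AND PROOFS =====

lemma pv_mem_delims_iff (c : Char) : c ∈ pvDelims ↔ pvIsDelim c = true := by
  simp [pvDelims, pvIsDelim]; tauto

lemma pv_join_nil_cons (x : List Char) (l : List (List Char)) :
    PySem.Chars.join [] (x :: l) = x ++ PySem.Chars.join [] l := by
  cases l <;> simp [PySem.Chars.join, List.intercalate, List.intersperse]

lemma pvLoopB_eq_nil {cs : List Char} {key : Int} {p : List (List Char)}
    {pat : PySem.Dict Int String} (h : cs.dropWhile (fun c => !pvIsDelim c) = []) :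
    pvLoopB cs key p pat = (p, pat) := by
  rw [pvLoopB.eq_def]
  split
  · rfl
  · rename_i d rest heq; rw [h] at heq; cases heq

lemma pvLoopB_eq_cons {cs : List Char} {key : Int} {p : List (List Char)}
    {pat : PySem.Dict Int String} {d : Char} {rest : List Char}
    (h : cs.dropWhile (fun c => !pvIsDelim c) = d :: rest) :
    pvLoopB cs key p pat =
      if cs.takeWhile (fun c => !pvIsDelim c) ≠ [] then
        pvLoopB rest (key + 1) (p ++ [PySem.Int.toChars key ++ [d]])
          (pat.insert key (String.ofList (cs.takeWhile (fun c => !pvIsDelim c))))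
      else
        pvLoopB rest key (p ++ [[d]]) pat := by
  rw [pvLoopB.eq_def]
  split
  · rename_i heq; rw [h] at heq; cases heq
  · rename_i d' rest' heq; rw [h] at heq
    injection heq with h1 h2; subst h1; subst h2; rfl

-- the pieces parameter of pvLoopB is a pure accumulator
lemma pvLoopB_acc : ∀ (n : Nat) (cs : List Char), cs.length ≤ n →
    ∀ (key : Int) (p : List (List Char)) (pat : PySem.Dict Int String),
    pvLoopB cs key p pat = (p ++ (pvLoopB cs key [] pat).1, (pvLoopB cs key [] pat).2) := by
  intro n
  induction n with
  | zero =>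
    intro cs hcs key p pat
    have hnil : cs = [] := List.eq_nil_of_length_eq_zero (Nat.le_zero.mp hcs)
    subst hnil
    rw [pvLoopB_eq_nil (by simp), pvLoopB_eq_nil (by simp)]
    simp
  | succ n ih =>
    intro cs hcs key p pat
    cases h : cs.dropWhile (fun c => !pvIsDelim c) with
    | nil => rw [pvLoopB_eq_nil h, pvLoopB_eq_nil h]; simp
    | cons d rest =>
      have hlt : rest.length ≤ n := by
        have hle : (cs.dropWhile (fun c => !pvIsDelim c)).length ≤ cs.length :=
          List.length_dropWhile_le _ _
        rw [h] at hle; simp at hle; omega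
      rw [pvLoopB_eq_cons h, pvLoopB_eq_cons h]
      split_ifs with hrun
      · rw [ih rest hlt _ (p ++ _), ih rest hlt _ ([] ++ _)]
        simp
      · rw [ih rest hlt _ (p ++ _), ih rest hlt _ ([] ++ _)]
        simp

-- A's loop, started with pending run `tmp` (no delimiters inside), computes the same
-- (simple_string, s_pattern) as B's token loop on `tmp ++ cs`
lemma pv_main : ∀ (cs tmp : List Char), (∀ c ∈ tmp, pvIsDelim c = false) →
    ∀ (key : Int) (pat : PySem.Dict Int String) (simple : List Char),
    ((cs.foldl pvStepA (pat, key, tmp, simple)).2.2.2,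
     (cs.foldl pvStepA (pat, key, tmp, simple)).1)
    = (simple ++ PySem.Chars.join [] (pvLoopB (tmp ++ cs) key [] pat).1,
       (pvLoopB (tmp ++ cs) key [] pat).2) := by
  intro cs
  induction cs with
  | nil =>
    intro tmp htmp key pat simple
    have hdrop : (tmp ++ ([] : List Char)).dropWhile (fun c => !pvIsDelim c) = [] := by
      apply List.dropWhile_eq_nil_iff.mpr
      intro c hc; simp at hc; simp [htmp c hc]
    rw [pvLoopB_eq_nil hdrop]
    simp [PySem.Chars.join, List.intercalate]
  | cons c cs ih =>
    intro tmp htmp key pat simple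
    have htmp' : ∀ x ∈ tmp, (fun c => !pvIsDelim c) x = true := by
      intro x hx; simp [htmp x hx]
    by_cases hc : c ∈ pvDelims
    · have hdc : pvIsDelim c = true := (pv_mem_delims_iff c).mp hc
      have hdrop : (tmp ++ c :: cs).dropWhile (fun c => !pvIsDelim c) = c :: cs := by
        rw [List.dropWhile_append_of_pos htmp']
        simp [List.dropWhile, hdc]
      have htake : (tmp ++ c :: cs).takeWhile (fun c => !pvIsDelim c) = tmp := by
        rw [List.takeWhile_append_of_pos htmp']
        simp [List.takeWhile, hdc]
      rw [pvLoopB_eq_cons hdrop, htake]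
      by_cases hrun : tmp = []
      · subst hrun
        rw [if_neg (by decide)]
        simp only [List.foldl_cons, pvStepA, if_pos hc]
        rw [if_neg (show ¬(([] : List Char) ≠ []) from by simp)]
        rw [pvLoopB_acc cs.length cs le_rfl key ([] ++ [[c]]) pat]
        rw [ih [] (by simp) key pat (simple ++ [c])]
        simp [pv_join_nil_cons]
      · rw [if_pos (by simpa using hrun)]
        simp only [List.foldl_cons, pvStepA, if_pos hc]
        rw [if_pos hrun]
        rw [pvLoopB_acc cs.length cs le_rfl (key + 1) ([] ++ [PySem.Int.toChars key ++ [c]]) _]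
        rw [ih [] (by simp) (key + 1) (pat.insert key (String.ofList tmp))
             (simple ++ PySem.Int.toChars key ++ [c])]
        simp [pv_join_nil_cons]
    · have hdc : pvIsDelim c = false := by
        by_contra hh
        exact hc ((pv_mem_delims_iff c).mpr (by revert hh; cases pvIsDelim c <;> simp))
      simp only [List.foldl_cons, pvStepA, if_neg hc]
      rw [ih (tmp ++ [c]) (by intro x hx; rcases List.mem_append.mp hx with h | h
                              · exact htmp x h
                              · simp at h; subst h; exact hdc) key pat simple]
      simp

-- ===== VERDICT (by name: the statement is the Claim_ definition above) =====
theorem simple_form_spec : Claim_equal_simple_form := by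
  intro s _
  unfold Spec_simple_form simple_form simple_form_alt
  have h := pv_main s.toList [] (by simp) 0 PySem.Dict.empty []
  simp only [List.nil_append] at h
  have h1 := congrArg Prod.fst h
  have h2 := congrArg Prod.snd h
  simp only at h1 h2
  simp [h1, h2]
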